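-- pv_equiv track=rewrite | github.com/sdoumi13/PROJET-SOC | Atelier-D/soc-ia-mitre/agents/xai_explainer.py | _extract_kill_chain
-- ===== SOURCE A (Python) =====
-- from typing import Dict, List
--
-- def _extract_kill_chain(techniques: List[Dict]) -> List[str]:
--     """Extrait la kill chain des techniques"""
--     kill_chain_order = [
--         'Reconnaissance', 'Resource Development', 'Initial Access',
--         'Execution', 'Persistence', 'Privilege Escalation',
--         'Defense Evasion', 'Credential Access', 'Discovery',
--         'Lateral Movement', 'Collection', 'Command and Control',
--         'Exfiltration', 'Impact'
--     ]
--
--     detected_tactics = set(t['tactic'] for t in techniques)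
--     return [tactic for tactic in kill_chain_order if tactic in detected_tactics]
-- ===== SOURCE B (Python) =====
-- from typing import Dict, List
--
-- def _extract_kill_chain(techniques: List[Dict]) -> List[str]:
--     """Extrait la kill chain des techniques (rank-index + sort instead of scanning the canonical order)"""
--     order = [
--         'Reconnaissance', 'Resource Development', 'Initial Access',
--         'Execution', 'Persistence', 'Privilege Escalation',
--         'Defense Evasion', 'Credential Access', 'Discovery',
--         'Lateral Movement', 'Collection', 'Command and Control',
--         'Exfiltration', 'Impact'
--     ]
--     rank = {name: i for i, name in enumerate(order)}
--     present = {rank[t['tactic']] for t in techniques if t['tactic'] in rank}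
--     return [order[i] for i in sorted(present)]
-- ===== Notes on version B (the rewrite author's own statement) =====
-- stated objective: alternative
-- what changed: A builds the set of detected tactic names and filters the canonical 14-name kill-chain list by membership; B instead builds a name->rank dict once, collects the set of ranks present in the input, sorts those ranks and maps each back to its name.
import Mathlib
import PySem

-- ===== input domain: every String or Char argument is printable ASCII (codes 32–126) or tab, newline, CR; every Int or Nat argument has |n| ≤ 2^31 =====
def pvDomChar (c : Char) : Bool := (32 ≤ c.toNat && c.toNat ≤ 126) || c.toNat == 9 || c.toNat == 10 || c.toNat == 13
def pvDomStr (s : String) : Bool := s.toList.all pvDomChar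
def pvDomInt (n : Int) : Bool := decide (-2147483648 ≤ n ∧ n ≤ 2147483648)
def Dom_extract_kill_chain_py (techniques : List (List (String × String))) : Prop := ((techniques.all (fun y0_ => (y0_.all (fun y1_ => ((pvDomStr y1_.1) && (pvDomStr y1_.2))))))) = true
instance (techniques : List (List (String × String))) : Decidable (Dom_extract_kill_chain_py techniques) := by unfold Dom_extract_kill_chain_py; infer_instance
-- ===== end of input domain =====

-- B replaces A's "scan the canonical order, test set membership" by "rank each detected tactic
-- via a name→index dict, sort the present ranks, map each rank back to its name" (objective: alternative).

-- the canonical kill-chain order (the literal list both Pythons spell out)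
def pvKco : List String :=
  ["Reconnaissance", "Resource Development", "Initial Access",
   "Execution", "Persistence", "Privilege Escalation",
   "Defense Evasion", "Credential Access", "Discovery",
   "Lateral Movement", "Collection", "Command and Control",
   "Exfiltration", "Impact"]

-- ===== PORT A =====
-- t['tactic'] is ported as getD with default ""; Pre_ excludes dicts without the key, where Python raises KeyError.
def extract_kill_chain_py (techniques : List (List (String × String))) : List String :=
  let detected : PySem.Set String :=
    PySem.Set.ofList (techniques.map (fun t => (PySem.Dict.mk t).getD "tactic" ""))
  pvKco.foldl (fun acc tactic => if detected.contains tactic then acc ++ [tactic] else acc) []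

-- ===== PORT B =====
-- rank = {name: i for i, name in enumerate(order)}
def pvRank : PySem.Dict String Int :=
  (PySem.List.enumerate pvKco).foldl (fun d p => d.insert p.2 p.1) PySem.Dict.empty

-- order[i] is exact here: every collected rank i satisfies 0 ≤ i < 14, so pyGet? is some
def extract_kill_chain_py_alt (techniques : List (List (String × String))) : List String :=
  let present : PySem.Set Int :=
    PySem.Set.ofList
      ((techniques.filter (fun t => pvRank.contains ((PySem.Dict.mk t).getD "tactic" ""))).map
        (fun t => pvRank.getD ((PySem.Dict.mk t).getD "tactic" "") 0))
  (PySem.List.sorted present (fun i => i)).map (fun i => (PySem.List.pyGet? pvKco i).getD "")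

-- ===== PRECONDITION & SPEC =====
-- Pre_ excludes technique dicts lacking the key 'tactic': there Python A (and B) raise KeyError.
def Pre_extract_kill_chain_py (techniques : List (List (String × String))) : Prop :=
  (techniques.all (fun t => t.any (fun p => p.1 == "tactic"))) = true
instance (techniques : List (List (String × String))) : Decidable (Pre_extract_kill_chain_py techniques) := by unfold Pre_extract_kill_chain_py; infer_instance

def pvWitness_extract_kill_chain_py : (List (List (String × String))) :=
  [[("tactic", "Execution")], [("tactic", "Impact"), ("id", "T1")]]

def Spec_extract_kill_chain_py (techniques : List (List (String × String))) (out : List String) : Prop := out = extract_kill_chain_py_alt techniques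
instance (techniques : List (List (String × String))) (out : List String) : Decidable (Spec_extract_kill_chain_py techniques out) := by unfold Spec_extract_kill_chain_py; infer_instance

-- ===== CLAIM (what is proved, stated in full; the proofs are below) =====
def Claim_equal_extract_kill_chain_py : Prop := ∀ (techniques : List (List (String × String))), Dom_extract_kill_chain_py techniques → Pre_extract_kill_chain_py techniques → Spec_extract_kill_chain_py techniques (extract_kill_chain_py techniques)

-- ===== LEMMAS AND PROOFS =====

-- proof-only abbreviations for the two intermediate lists of the ports
def pvNames (techniques : List (List (String × String))) : List String :=
  techniques.map (fun t => (PySem.Dict.mk t).getD "tactic" "")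

def pvL (techniques : List (List (String × String))) : List Int :=
  (techniques.filter (fun t => pvRank.contains ((PySem.Dict.mk t).getD "tactic" ""))).map
    (fun t => pvRank.getD ((PySem.Dict.mk t).getD "tactic" "") 0)

def pvInts : List Int := [0,1,2,3,4,5,6,7,8,9,10,11,12,13]

-- the (name, rank) pairs of pvRank, as a flat literal list
def pvPairs : List (String × Int) :=
  [("Reconnaissance", 0), ("Resource Development", 1), ("Initial Access", 2),
   ("Execution", 3), ("Persistence", 4), ("Privilege Escalation", 5),
   ("Defense Evasion", 6), ("Credential Access", 7), ("Discovery", 8),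
   ("Lateral Movement", 9), ("Collection", 10), ("Command and Control", 11),
   ("Exfiltration", 12), ("Impact", 13)]

lemma pvRank_eq : pvRank = PySem.Dict.mk pvPairs := by decide

lemma pvRank_get?_iff (n : String) (i : Int) :
    pvRank.get? n = some i ↔ (n, i) ∈ pvPairs := by
  rw [pvRank_eq]
  exact PySem.Dict.get?_eq_some_iff_mem_items _ _ _ (by decide)

lemma pvRank_get?_some_mem_ranks (n : String) (i : Int)
    (h : pvRank.get? n = some i) : i ∈ pvInts := by
  rw [pvRank_get?_iff] at h
  fin_cases h <;> decide

-- membership in the collected-rank list of B, characterised by pvRank.get?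
lemma mem_pvL_iff (techniques : List (List (String × String))) (i : Int) :
    i ∈ pvL techniques ↔ ∃ n ∈ pvNames techniques, pvRank.get? n = some i := by
  unfold pvL pvNames
  simp only [List.mem_map, List.mem_filter]
  constructor
  · rintro ⟨t, ⟨ht, hc⟩, hi⟩
    refine ⟨(PySem.Dict.mk t).getD "tactic" "", ⟨t, ht, rfl⟩, ?_⟩
    rw [PySem.Dict.contains_eq_isSome_get?] at hc
    rw [PySem.Dict.getD_eq_get?_getD] at hi
    cases hg : pvRank.get? ((PySem.Dict.mk t).getD "tactic" "") with
    | none => rw [hg] at hc; simp at hc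
    | some j =>
        rw [hg] at hi; simp only [Option.getD_some] at hi; exact congrArg some hi
  · rintro ⟨n, ⟨t, ht, rfl⟩, hg⟩
    refine ⟨t, ⟨ht, ?_⟩, ?_⟩
    · rw [PySem.Dict.contains_eq_isSome_get?, hg]; rfl
    · rw [PySem.Dict.getD_eq_get?_getD, hg]; rfl

-- the two filter conditions agree at a (name, rank) pair of pvPairs
lemma pv_cond_eq (techniques : List (List (String × String))) (s : String) (i : Int)
    (hsi : ∀ n : String, (n, i) ∈ pvPairs ↔ n = s) :
    decide (i ∈ pvL techniques) = (PySem.Set.ofList (pvNames techniques)).contains s := by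
  have h1 : i ∈ pvL techniques ↔ s ∈ pvNames techniques := by
    rw [mem_pvL_iff]
    simp only [pvRank_get?_iff, hsi]
    constructor
    · rintro ⟨n, hn, rfl⟩; exact hn
    · intro h; exact ⟨s, h, rfl⟩
  by_cases hm : s ∈ pvNames techniques
  · rw [PySem.Set.contains_iff .. |>.mpr (PySem.Set.mem_ofList .. |>.mpr hm),
      decide_eq_true (h1.mpr hm)]
  · have hc : (PySem.Set.ofList (pvNames techniques)).contains s = false := by
      simp [PySem.Set.mem_ofList, hm]
    rw [hc]
    simp [h1, hm]

-- generic shape of the final equality: filter the names ↔ filter-then-map the ranks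
lemma filter_map_pair {α β γ : Type} (P : List (α × β)) (p : α → Bool) (q : β → Bool)
    (g : β → γ) (g' : α → γ) (h : ∀ x ∈ P, q x.2 = p x.1 ∧ g x.2 = g' x.1) :
    ((P.map Prod.snd).filter q).map g = ((P.map Prod.fst).filter p).map g' := by
  induction P with
  | nil => rfl
  | cons a l ih =>
    have ha := h a (by simp)
    have ih' := ih (fun x hx => h x (by simp [hx]))
    simp only [List.map_cons, List.filter_cons, ha.1]
    by_cases hp : p a.1 = true
    · simp [hp, ih', ha.2]
    · simp only [Bool.not_eq_true] at hp
      simp [hp, ih']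

lemma pv_sorted_eq (techniques : List (List (String × String))) :
    PySem.List.sorted (PySem.Set.ofList (pvL techniques)) (fun i => i) =
      pvInts.filter (fun i => decide (i ∈ pvL techniques)) := by
  apply PySem.List.sorted_eq_of_perm_of_pairwise_lt
  · rw [List.perm_ext_iff_of_nodup ((by decide : pvInts.Nodup).filter _)
      (PySem.Set.nodup_ofList _)]
    intro a
    simp only [List.mem_filter, PySem.Set.mem_ofList, decide_eq_true_eq]
    constructor
    · rintro ⟨-, h⟩; exact h
    · intro h
      rcases (mem_pvL_iff techniques a).mp h with ⟨n, -, hg⟩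
      exact ⟨pvRank_get?_some_mem_ranks n a hg, h⟩
  · exact (by decide : pvInts.Pairwise (· < ·)).filter _

-- ===== VERDICT (by name: the statement is the Claim_ definition above) =====
theorem extract_kill_chain_py_spec : Claim_equal_extract_kill_chain_py := by
  intro techniques _ _
  show extract_kill_chain_py techniques = extract_kill_chain_py_alt techniques
  have hA : extract_kill_chain_py techniques =
      pvKco.filter (fun s => (PySem.Set.ofList (pvNames techniques)).contains s) := by
    unfold extract_kill_chain_py pvNames
    rw [PySem.List.foldl_append_if_eq_filter]
    rfl
  have hB : extract_kill_chain_py_alt techniques =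
      (pvInts.filter (fun i => decide (i ∈ pvL techniques))).map
        (fun i => (PySem.List.pyGet? pvKco i).getD "") := by
    show (PySem.List.sorted (PySem.Set.ofList (pvL techniques)) (fun i => i)).map
        (fun i => (PySem.List.pyGet? pvKco i).getD "") = _
    rw [pv_sorted_eq]
  have h : ∀ x ∈ pvPairs,
      (fun i => decide (i ∈ pvL techniques)) x.2 =
        (fun s => (PySem.Set.ofList (pvNames techniques)).contains s) x.1 ∧
      (fun i => (PySem.List.pyGet? pvKco i).getD "") x.2 = (fun s => s) x.1 := by
    intro x hx
    fin_cases hx <;>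
      exact ⟨pv_cond_eq techniques _ _ (by intro n; simp [pvPairs, Prod.ext_iff]), by decide⟩
  have hmain := filter_map_pair pvPairs
    (fun s => (PySem.Set.ofList (pvNames techniques)).contains s)
    (fun i => decide (i ∈ pvL techniques))
    (fun i => (PySem.List.pyGet? pvKco i).getD "") (fun s => s) h
  rw [hA, hB]
  have hfst : pvPairs.map Prod.fst = pvKco := by decide
  have hsnd : pvPairs.map Prod.snd = pvInts := by decide
  rw [hfst, hsnd] at hmain
  rw [hmain]
  simp
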